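-- pv_equiv track=rewrite | github.com/Shunikai972/BUT1 | R107 Outils Fondamentaux/exercices/1-1.py | diagonale
-- ===== SOURCE A (Python) =====
-- def diagonale(A):
--     """
--     Prend en entrée une matrice A (liste de listes) de taille p × n
--     et retourne une matrice B ne conservant que les éléments diagonaux.
--     """
--     p = len(A)
--     n = len(A[0]) if p > 0 else 0
--
--     B = []
--     for i in range(p):
--         ligne = []
--         for j in range(n):
--             if i == j:
--                 ligne.append(A[i][j])
--             else:
--                 ligne.append(0)
--         B.append(ligne)
--     return B
-- ===== SOURCE B (Python) =====
-- def diagonale(A):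
--     n = len(A[0]) if A else 0
--     B = []
--     for i, row in enumerate(A):
--         if i < n:
--             B.append([0] * i + [row[i]] + [0] * (n - i - 1))
--         else:
--             B.append([0] * n)
--     return B
-- ===== Notes on version B (the rewrite author's own statement) =====
-- stated objective: idiomatic
-- what changed: Each output row is assembled in one shot as the concatenation [0]*i + [A[i][i]] + [0]*(n-i-1) while iterating with enumerate, so the inner per-element loop with its i==j branch disappears entirely.
import Mathlib
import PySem

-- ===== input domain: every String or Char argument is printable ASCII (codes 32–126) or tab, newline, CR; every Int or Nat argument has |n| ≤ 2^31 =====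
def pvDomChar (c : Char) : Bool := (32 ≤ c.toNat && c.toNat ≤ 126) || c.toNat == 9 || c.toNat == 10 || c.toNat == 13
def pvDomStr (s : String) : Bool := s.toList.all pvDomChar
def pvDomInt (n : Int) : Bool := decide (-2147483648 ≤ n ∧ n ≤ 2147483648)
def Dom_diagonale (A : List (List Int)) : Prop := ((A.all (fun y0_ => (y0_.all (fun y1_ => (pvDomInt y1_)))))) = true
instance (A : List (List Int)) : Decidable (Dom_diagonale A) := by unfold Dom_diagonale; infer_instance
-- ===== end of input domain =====

-- B builds each output row in one shot by concatenating zero blocks around the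
-- single diagonal entry ([0]*i + [A[i][i]] + [0]*(n-i-1)), iterating with
-- enumerate — no inner per-element loop (objective: idiomatic).


-- ===== PORT A =====
-- Nested loops over range(p) × range(n); reads A[i][j] only on the diagonal branch
-- (getD is exact inside Pre_, which excludes the IndexError inputs).
def diagonale (A : List (List Int)) : List (List Int) :=
  let p := A.length
  let n := if p > 0 then (A.headD []).length else 0
  (List.range p).foldl (fun B i =>
    B ++ [(List.range n).foldl (fun ligne j =>
      ligne ++ [if i = j then (A.getD i []).getD j 0 else 0]) []]) []

-- ===== PORT B =====
-- enumerate(A); each row is assembled by concatenation of replicate blocks.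
def diagonale_alt (A : List (List Int)) : List (List Int) :=
  let n := if A.length > 0 then (A.headD []).length else 0
  (PySem.List.enumerate A 0).foldl (fun B x =>
    B ++ [if x.1 < (n : Int) then
            List.replicate x.1.toNat (0 : Int) ++ [x.2.getD x.1.toNat 0]
              ++ List.replicate (n - x.1.toNat - 1) (0 : Int)
          else List.replicate n (0 : Int)]) []

-- ===== PRECONDITION & SPEC =====
-- Pre_ excludes exactly the ragged matrices on which the Python raises IndexError
-- (a diagonal entry A[i][i] with i < n missing from a short row i).
def Pre_diagonale (A : List (List Int)) : Prop :=
  ∀ i < min A.length (if A.length > 0 then (A.headD []).length else 0),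
    i < (A.getD i []).length
instance (A : List (List Int)) : Decidable (Pre_diagonale A) := by unfold Pre_diagonale; infer_instance
def pvWitness_diagonale : List (List Int) := [[1, 2], [3, 4]]
def Spec_diagonale (A : List (List Int)) (out : List (List Int)) : Prop := out = diagonale_alt A
instance (A : List (List Int)) (out : List (List Int)) : Decidable (Spec_diagonale A out) := by unfold Spec_diagonale; infer_instance

-- ===== CLAIM (what is proved, stated in full; the proofs are below) =====
def Claim_equal_diagonale : Prop := ∀ (A : List (List Int)), Dom_diagonale A → Pre_diagonale A → Spec_diagonale A (diagonale A)

-- ===== LEMMAS AND PROOFS =====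

-- append-fold builds the map.
theorem foldl_append_map {α β : Type} (f : α → β) (l : List α) :
    l.foldl (fun acc i => acc ++ [f i]) [] = l.map f := by
  have h : ∀ acc : List β, l.foldl (fun acc i => acc ++ [f i]) acc = acc ++ l.map f := by
    induction l with
    | nil => simp
    | cons a t ih => intro acc; simp [ih]
  simpa using h []

-- one A-row (map over range with an i==j branch) as the block concatenation, diagonal case
theorem row_eq_diag (n i : Nat) (f : Nat → Int) (hi : i < n) :
    (List.range n).map (fun j => if i = j then f j else 0) =
      List.replicate i (0 : Int) ++ [f i] ++ List.replicate (n - i - 1) (0 : Int) := by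
  apply List.ext_getElem
  · simp; omega
  · intro k hk hk'
    simp only [List.getElem_map, List.getElem_range]
    rcases lt_trichotomy k i with h | h | h
    · rw [List.getElem_append_left (by simp only [List.length_append, List.length_replicate, List.length_cons, List.length_nil]; omega)]
      rw [List.getElem_append_left (by simp only [List.length_append, List.length_replicate, List.length_cons, List.length_nil]; omega)]
      simp only [List.getElem_replicate]
      have : i ≠ k := by omega
      simp [this]
    · subst h
      rw [List.getElem_append_left (by simp only [List.length_append, List.length_replicate, List.length_cons, List.length_nil]; omega)]
      rw [List.getElem_append_right (by simp only [List.length_replicate]; omega)]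
      simp only [List.length_replicate]
      simp
    · rw [List.getElem_append_right (by simp only [List.length_append, List.length_replicate, List.length_cons, List.length_nil]; omega)]
      simp only [List.getElem_replicate]
      have : i ≠ k := by omega
      simp [this]

-- one A-row, off-diagonal case (i ≥ n): all zeros
theorem row_eq_zero (n i : Nat) (f : Nat → Int) (hi : ¬ i < n) :
    (List.range n).map (fun j => if i = j then f j else 0) =
      List.replicate n (0 : Int) := by
  apply List.ext_getElem
  · simp
  · intro k hk hk'
    simp only [List.getElem_map, List.getElem_range, List.getElem_replicate]
    have : i ≠ k := by simp at hk; omega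
    simp [this]

theorem diagonale_spec_aux (A : List (List Int)) : diagonale A = diagonale_alt A := by
  unfold diagonale diagonale_alt
  simp only [foldl_append_map]
  set n := if A.length > 0 then (A.headD []).length else 0 with hn
  apply List.ext_getElem?
  intro i
  rw [List.getElem?_map, List.getElem?_map, PySem.List.getElem?_enumerate]
  by_cases hip : i < A.length
  · rw [List.getElem?_range hip, List.getElem?_eq_getElem hip]
    simp only [Option.map_some]
    congr 1
    have hA : A.getD i [] = A[i] := by
      simp [List.getD, List.getElem?_eq_getElem hip]
    by_cases hin : i < n
    · have hlt : ((0 : Int) + i) < (n : Int) := by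
        simp; exact_mod_cast hin
      rw [if_pos hlt]
      have ht : ((0 : Int) + i).toNat = i := by omega
      rw [ht, row_eq_diag n i (fun j => (A.getD i []).getD j 0) hin, hA]
    · have hlt : ¬ ((0 : Int) + i) < (n : Int) := by
        simp; exact_mod_cast Nat.not_lt.mp hin
      rw [if_neg hlt]
      exact row_eq_zero n i (fun j => (A.getD i []).getD j 0) hin
  · simp [hip]

-- ===== VERDICT (by name: the statement is the Claim_ definition above) =====
theorem diagonale_spec : Claim_equal_diagonale := by
  intro A _ _
  exact diagonale_spec_aux A
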